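-- pv_equiv track=rewrite | github.com/Snakey11/Legends-of-Avenir | CSV/Tables/TableManager.py | segmentLists
-- ===== SOURCE A (Python) =====
-- def segmentLists(list):
--     ret = [] # Returning a list of lists (of doubles), split up by CSV entry.
--     CSVLocs = [] # List of indexes where entries start.
--     for i,e in enumerate(list):
--         if e[0].startswith('CSV'):
--             CSVLocs.append(i)
--     for i in range(len(CSVLocs)):
--         if i < len(CSVLocs)-1:
--             ret.append(list[CSVLocs[i]:CSVLocs[i+1]])
--         else:
--             ret.append(list[CSVLocs[i]:len(list)])
--     return ret
-- ===== SOURCE B (Python) =====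
-- def segmentLists(list):
--     # Single pass: start a new segment at each 'CSV'-prefixed entry, append
--     # following entries to the current segment; entries before the first CSV
--     # entry are dropped (no current segment yet).
--     ret = []
--     cur = None
--     for e in list:
--         if e[0].startswith('CSV'):
--             cur = [e]
--             ret.append(cur)
--         elif cur is not None:
--             cur.append(e)
--     return ret
-- ===== Notes on version B (the rewrite author's own statement) =====
-- stated objective: simpler
-- what changed: Replaces A's two-phase index collection plus range-loop slicing with a single pass that opens a new segment at each 'CSV'-prefixed entry and appends other entries to the current segment.
import Mathlib
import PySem

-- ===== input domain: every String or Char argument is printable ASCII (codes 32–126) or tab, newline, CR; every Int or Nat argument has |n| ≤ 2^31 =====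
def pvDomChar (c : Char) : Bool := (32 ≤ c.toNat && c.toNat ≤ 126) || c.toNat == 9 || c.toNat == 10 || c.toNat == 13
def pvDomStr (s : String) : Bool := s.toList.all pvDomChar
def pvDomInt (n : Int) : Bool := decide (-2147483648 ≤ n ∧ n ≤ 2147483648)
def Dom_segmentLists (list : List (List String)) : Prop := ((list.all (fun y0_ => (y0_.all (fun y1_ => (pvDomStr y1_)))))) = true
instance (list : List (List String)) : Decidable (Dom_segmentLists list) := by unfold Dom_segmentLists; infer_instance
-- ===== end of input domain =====

-- B is a single pass (current-segment accumulator) instead of A's two-phase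
-- index collection plus range-loop slicing; equal return value on Pre_.

-- e[0].startswith('CSV'); total stand-in: outside Pre_ (where e = [], Python raises
-- IndexError) it reads "" and returns false.
def startsCSV (e : List String) : Bool :=
  PySem.Str.startswith (PySem.List.pyGetD e 0 "") "CSV"

-- ===== PORT A =====
def segmentLists (list : List (List String)) : List (List (List String)) :=
  let ret : List (List (List String)) := []
  let csvLocs : List Int :=
    (PySem.List.enumerate list 0).foldl
      (fun acc ie => if startsCSV ie.2 then acc ++ [ie.1] else acc) []
  (PySem.List.pyRange 0 (csvLocs.length : Int) 1).foldl
    (fun ret i =>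
      if i < (csvLocs.length : Int) - 1 then
        ret ++ [PySem.List.slice list (some (PySem.List.pyGetD csvLocs i 0))
                  (some (PySem.List.pyGetD csvLocs (i + 1) 0))]
      else
        ret ++ [PySem.List.slice list (some (PySem.List.pyGetD csvLocs i 0))
                  (some (list.length : Int))])
    ret

-- ===== PORT B =====
-- functional model of Source B's mutation: state = (closed segments, current open segment)
def altStep (st : List (List (List String)) × Option (List (List String)))
    (e : List String) : List (List (List String)) × Option (List (List String)) :=
  if startsCSV e then
    ((match st.2 with | none => st.1 | some c => st.1 ++ [c]), some [e])
  else
    match st.2 with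
    | none => st
    | some c => (st.1, some (c ++ [e]))

def altFinish (st : List (List (List String)) × Option (List (List String))) :
    List (List (List String)) :=
  match st.2 with | none => st.1 | some c => st.1 ++ [c]

def segmentLists_alt (list : List (List String)) : List (List (List String)) :=
  altFinish (list.foldl altStep ([], none))

-- ===== PRECONDITION & SPEC =====
-- Pre_ excludes exactly the inputs where Python A raises IndexError: a list
-- containing an empty sublist (e[0] fails).
def Pre_segmentLists (list : List (List String)) : Prop := ∀ e ∈ list, e ≠ []
instance (list : List (List String)) : Decidable (Pre_segmentLists list) := by
  unfold Pre_segmentLists; infer_instance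

def pvWitness_segmentLists : List (List String) := [["CSV1"], ["a"], ["CSV2"]]

def Spec_segmentLists (list : List (List String)) (out : List (List (List String))) : Prop := out = segmentLists_alt list
instance (list : List (List String)) (out : List (List (List String))) : Decidable (Spec_segmentLists list out) := by unfold Spec_segmentLists; infer_instance

-- ===== CLAIM (what is proved, stated in full; the proofs are below) =====
def Claim_equal_segmentLists : Prop := ∀ (list : List (List String)), Dom_segmentLists list → Pre_segmentLists list → Spec_segmentLists list (segmentLists list)

-- ===== LEMMAS AND PROOFS =====

-- Canonical recursive description of the segmentation; both ports are proved equal to it.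
def Fseg : List (List String) → List (List (List String))
  | [] => []
  | e :: r =>
    if startsCSV e then
      (e :: r.takeWhile (fun x => !startsCSV x)) :: Fseg (r.dropWhile (fun x => !startsCSV x))
    else Fseg r
termination_by l => l.length
decreasing_by
  · simpa using Nat.lt_succ_of_le (List.length_dropWhile_le _ _)
  · simp

-- slices of l between consecutive locations (A's second loop, structurally)
def segsOf (l : List (List String)) : List Int → List (List (List String))
  | [] => []
  | [i] => [PySem.List.slice l (some i) (some (l.length : Int))]
  | i :: j :: rest => PySem.List.slice l (some i) (some j) :: segsOf l (j :: rest)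

-- A's first loop (indices of CSV entries, with enumerate start s)
def locsI (l : List (List String)) (s : Int) : List Int :=
  ((PySem.List.enumerate l s).filter (fun ie => startsCSV ie.2)).map (·.1)

-- the per-index body of A's second loop
def hfun (l : List (List String)) (locs : List Int) (k : Nat) : List (List String) :=
  if k + 1 < locs.length then
    PySem.List.slice l (some (locs.getD k 0)) (some (locs.getD (k + 1) 0))
  else
    PySem.List.slice l (some (locs.getD k 0)) (some (l.length : Int))

lemma locsI_nil (s : Int) : locsI [] s = [] := by
  simp [locsI, PySem.List.enumerate_nil]

lemma locsI_cons (e : List String) (r : List (List String)) (s : Int) :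
    locsI (e :: r) s = if startsCSV e then s :: locsI r (s + 1) else locsI r (s + 1) := by
  simp only [locsI, PySem.List.enumerate_cons, List.filter_cons]
  split_ifs with h <;> simp

lemma locsI_shift (l : List (List String)) (s : Int) :
    locsI l (s + 1) = (locsI l s).map (· + 1) := by
  induction l generalizing s with
  | nil => simp [locsI_nil]
  | cons e r ih =>
    rw [locsI_cons, locsI_cons]
    split_ifs with h <;> simp [ih]

lemma locsI_nonneg (l : List (List String)) (s : Int) (hs : 0 ≤ s) :
    ∀ x ∈ locsI l s, 0 ≤ x := by
  induction l generalizing s with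
  | nil => simp [locsI_nil]
  | cons e r ih =>
    rw [locsI_cons]
    split_ifs with h
    · intro x hx
      rcases List.mem_cons.mp hx with rfl | hx
      · exact hs
      · exact ih (s + 1) (by omega) x hx
    · exact ih (s + 1) (by omega)

lemma locsI_head (l : List (List String)) (s j : Int) (rest : List Int)
    (h : locsI l s = j :: rest) :
    j = s + ((l.takeWhile (fun x => !startsCSV x)).length : Int) := by
  induction l generalizing s j rest with
  | nil => simp [locsI_nil] at h
  | cons e r ih =>
    rw [locsI_cons] at h
    by_cases hcsv : startsCSV e
    · simp [hcsv] at h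
      simp [hcsv, h.1]
    · simp [hcsv] at h
      have := ih (s + 1) j rest h
      simp [hcsv, this]
      push_cast
      ring

lemma locsI_nil_iff (l : List (List String)) (s : Int) :
    locsI l s = [] ↔ ∀ e ∈ l, ¬ startsCSV e := by
  induction l generalizing s with
  | nil => simp [locsI_nil]
  | cons e r ih =>
    rw [locsI_cons]
    by_cases h : startsCSV e
    · simp [h]
    · simpa [h] using ih (s + 1)

-- shift a slice by one element in front
lemma slice_shift (e : List String) (r : List (List String)) (i j : Int)
    (hi : 0 ≤ i) (hj : 0 ≤ j) :
    PySem.List.slice (e :: r) (some (i + 1)) (some (j + 1)) =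
      PySem.List.slice r (some i) (some j) := by
  rw [PySem.List.slice_toNat _ (by omega) (by omega),
      PySem.List.slice_toNat _ hi hj]
  have h1 : (i + 1).toNat = i.toNat + 1 := by omega
  have h2 : (j + 1).toNat - (i + 1).toNat = j.toNat - i.toNat := by omega
  rw [h2, h1, List.drop_succ_cons]

lemma segsOf_shift (e : List String) (r : List (List String)) (locs : List Int)
    (h : ∀ x ∈ locs, 0 ≤ x) :
    segsOf (e :: r) (locs.map (· + 1)) = segsOf r locs := by
  induction locs with
  | nil => simp [segsOf]
  | cons i rest ih =>
    cases rest with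
    | nil =>
      simp only [List.map_cons, List.map_nil, segsOf]
      rw [show ((e :: r).length : Int) = (r.length : Int) + 1 by push_cast [List.length_cons]; ring]
      rw [slice_shift e r i (r.length : Int) (h i (by simp)) (by positivity)]
    | cons j more =>
      simp only [List.map_cons, segsOf]
      rw [slice_shift e r i j (h i (by simp)) (h j (by simp))]
      have hih := ih (fun x hx => h x (List.mem_cons_of_mem _ hx))
      simp only [List.map_cons] at hih
      rw [hih]

-- A's range-loop, turned structural
lemma mapRange_segsOf (l : List (List String)) (locs : List Int) :
    (List.range locs.length).map (hfun l locs) = segsOf l locs := by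
  induction locs with
  | nil => simp [segsOf]
  | cons i rest ih =>
    rw [List.length_cons, List.range_succ_eq_map, List.map_cons, List.map_map]
    have hshift : (hfun l (i :: rest)) ∘ Nat.succ = hfun l rest := by
      funext k
      simp only [Function.comp, hfun, List.length_cons, List.getD_cons_succ]
      have : k + 1 + 1 < rest.length + 1 ↔ k + 1 < rest.length := by omega
      rw [if_congr this rfl rfl]
    rw [hshift, ih]
    cases rest with
    | nil => simp [segsOf, hfun]
    | cons j more =>
      simp only [segsOf, hfun, List.length_cons, List.getD_cons_zero, List.getD_cons_succ]
      rw [if_pos (by omega)]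

lemma take_takeWhile {α : Type} (p : α → Bool) (l : List α) :
    l.take ((l.takeWhile p).length) = l.takeWhile p := by
  induction l with
  | nil => rfl
  | cons x t ih =>
    by_cases h : p x <;> simp [List.takeWhile_cons, h, ih]

lemma fseg_dropWhile (l : List (List String)) :
    Fseg l = Fseg (l.dropWhile (fun x => !startsCSV x)) := by
  induction l with
  | nil => rfl
  | cons e r ih =>
    by_cases h : startsCSV e
    · simp [List.dropWhile_cons, h]
    · rw [show Fseg (e :: r) = Fseg r by simp [Fseg, h]]
      simpa [List.dropWhile_cons, h] using ih

-- ===== A = Fseg =====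

lemma segmentLists_eq_map_hfun (l : List (List String)) :
    segmentLists l = (List.range (locsI l 0).length).map (hfun l (locsI l 0)) := by
  unfold segmentLists
  rw [PySem.List.foldl_append_if]
  have hlocs : ((PySem.List.enumerate l 0).filter (fun ie => startsCSV ie.2)).map (·.1)
      = locsI l 0 := rfl
  simp only [List.nil_append, hlocs]
  set locs := locsI l 0 with hdef
  have hbody : (fun (ret : List (List (List String))) (i : Int) =>
      if i < (locs.length : Int) - 1 then
        ret ++ [PySem.List.slice l (some (PySem.List.pyGetD locs i 0))
                  (some (PySem.List.pyGetD locs (i + 1) 0))]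
      else
        ret ++ [PySem.List.slice l (some (PySem.List.pyGetD locs i 0))
                  (some (l.length : Int))]) =
      (fun ret i => ret ++
        [if i < (locs.length : Int) - 1 then
          PySem.List.slice l (some (PySem.List.pyGetD locs i 0))
            (some (PySem.List.pyGetD locs (i + 1) 0))
         else
          PySem.List.slice l (some (PySem.List.pyGetD locs i 0))
            (some (l.length : Int))]) := by
    funext ret i; split_ifs <;> rfl
  rw [hbody, PySem.List.foldl_append_singleton_eq_map, List.nil_append,
      PySem.List.pyRange_one, List.map_map]
  have : ((locs.length : Int) - 0).toNat = locs.length := by omega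
  rw [this]
  apply List.map_congr_left
  intro k hk
  have hk' : k < locs.length := List.mem_range.mp hk
  simp only [Function.comp, zero_add, hfun]
  have hc : ((k : Int) < (locs.length : Int) - 1) ↔ (k + 1 < locs.length) := by omega
  have g1 : PySem.List.pyGetD locs (k : Int) 0 = locs.getD k 0 :=
    PySem.List.pyGetD_natCast ..
  have g2 : PySem.List.pyGetD locs ((k : Int) + 1) 0 = locs.getD (k + 1) 0 := by
    rw [show ((k : Int) + 1) = ((k + 1 : Nat) : Int) by push_cast; ring]
    exact PySem.List.pyGetD_natCast ..
  rw [if_congr hc rfl rfl, g1, g2]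

lemma segmentLists_eq_fseg (l : List (List String)) :
    segmentLists l = Fseg l := by
  rw [segmentLists_eq_map_hfun, mapRange_segsOf]
  induction l with
  | nil => simp [locsI_nil, segsOf, Fseg]
  | cons e r ih =>
    rw [locsI_cons]
    by_cases h : startsCSV e
    · rw [if_pos h]
      have hshift : locsI r (0 + 1) = (locsI r 0).map (· + 1) := locsI_shift r 0
      rcases hr : locsI r 0 with _ | ⟨j, more⟩
      · -- no CSV entry in r: one segment, the whole list
        rw [hshift, hr, List.map_nil]
        have hall : ∀ x ∈ r, ¬ startsCSV x := fun x hx =>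
          (locsI_nil_iff r 0).mp hr x hx
        have htk : r.takeWhile (fun x => !startsCSV x) = r :=
          List.takeWhile_eq_self_iff.mpr (fun x hx => by simpa using hall x hx)
        have hdw : r.dropWhile (fun x => !startsCSV x) = [] :=
          List.dropWhile_eq_nil_iff.mpr (fun x hx => by simpa using hall x hx)
        rw [show Fseg (e :: r) = (e :: r.takeWhile (fun x => !startsCSV x)) ::
              Fseg (r.dropWhile (fun x => !startsCSV x)) by simp [Fseg, h]]
        rw [htk, hdw]
        show [PySem.List.slice (e :: r) (some 0) (some ((e :: r).length : Int))] = _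
        rw [PySem.List.slice_zero_start, PySem.List.slice_to_natCast, List.take_length]
        simp [Fseg]
      · rw [hshift, hr, List.map_cons]
        show PySem.List.slice (e :: r) (some 0) (some (j + 1)) ::
            segsOf (e :: r) ((j + 1) :: more.map (· + 1)) = _
        have hmore : segsOf (e :: r) ((j + 1) :: more.map (· + 1)) = segsOf r (j :: more) := by
          have hnn : ∀ x ∈ (j :: more), (0:Int) ≤ x := by
            rw [← hr]; exact locsI_nonneg r 0 le_rfl
          have := segsOf_shift e r (j :: more) hnn
          simpa only [List.map_cons] using this
        rw [hr] at ih
        rw [hmore, ih]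
        have hj : j = 0 + ((r.takeWhile (fun x => !startsCSV x)).length : Int) :=
          locsI_head r 0 j more hr
        have hseg1 : PySem.List.slice (e :: r) (some 0) (some (j + 1)) =
            e :: r.takeWhile (fun x => !startsCSV x) := by
          rw [hj]
          rw [show (0 : Int) + ((r.takeWhile (fun x => !startsCSV x)).length : Int) + 1 =
              (((r.takeWhile (fun x => !startsCSV x)).length + 1 : Nat) : Int) by push_cast; ring]
          rw [PySem.List.slice_zero_start, PySem.List.slice_to_natCast, List.take_succ_cons,
              take_takeWhile]
        rw [hseg1, show Fseg (e :: r) = (e :: r.takeWhile (fun x => !startsCSV x)) ::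
              Fseg (r.dropWhile (fun x => !startsCSV x)) by simp [Fseg, h]]
        rw [fseg_dropWhile r]
    · rw [if_neg h]
      have hshift : locsI r (0 + 1) = (locsI r 0).map (· + 1) := locsI_shift r 0
      rw [hshift, segsOf_shift e r _ (locsI_nonneg r 0 le_rfl), ih]
      simp [Fseg, h]

-- ===== B = Fseg =====

lemma bfold_some (l : List (List String)) (done : List (List (List String)))
    (c : List (List String)) :
    altFinish (l.foldl altStep (done, some c)) =
      done ++ (c ++ l.takeWhile (fun x => !startsCSV x)) ::
        Fseg (l.dropWhile (fun x => !startsCSV x)) := by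
  induction l generalizing done c with
  | nil => simp [altFinish, Fseg]
  | cons e r ih =>
    by_cases h : startsCSV e
    · simp only [List.foldl_cons, altStep, h, if_pos]
      rw [ih]
      simp [List.dropWhile_cons, h, Fseg]
    · simp only [List.foldl_cons, altStep, h]
      rw [if_neg (by simp [h])]
      rw [ih]
      simp [List.takeWhile_cons, h]

lemma bfold_none (l : List (List String)) (done : List (List (List String))) :
    altFinish (l.foldl altStep (done, none)) = done ++ Fseg l := by
  induction l generalizing done with
  | nil => simp [altFinish, Fseg]
  | cons e r ih =>
    by_cases h : startsCSV e
    · simp only [List.foldl_cons, altStep, h, if_pos]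
      rw [bfold_some]
      simp [Fseg, h]
    · simp only [List.foldl_cons, altStep, h]
      rw [if_neg (by simp [h])]
      rw [ih]
      simp [Fseg, h]

lemma segmentLists_alt_eq_fseg (l : List (List String)) :
    segmentLists_alt l = Fseg l := by
  unfold segmentLists_alt
  simpa using bfold_none l []

-- ===== VERDICT (by name: the statement is the Claim_ definition above) =====
theorem segmentLists_spec : Claim_equal_segmentLists := by
  intro l _ _
  unfold Spec_segmentLists
  rw [segmentLists_eq_fseg, segmentLists_alt_eq_fseg]
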